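-- pv_equiv track=rewrite | github.com/Fubuzz/Rover_Network_agent | services/classification.py | get_classification_reasoning
-- ===== SOURCE A (Python) =====
-- from typing import Dict, Any, Tuple
--
-- def get_classification_reasoning(contact_data: Dict,
--                                 classification: str) -> str:
--     """
--     Get a human-readable explanation for the classification.
--     """
--     job_title = contact_data.get("job_title", "").lower()
--     company = contact_data.get("company", "").lower()
--
--     reasons = []
--
--     if classification == "founder":
--         if any(kw in job_title for kw in ["founder", "ceo", "chief executive"]):
--             reasons.append(f"Job title indicates a founding role")
--         if any(kw in job_title for kw in ["entrepreneur", "started"]):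
--             reasons.append("Background suggests entrepreneurship")
--
--     elif classification == "investor":
--         if any(kw in job_title for kw in ["investor", "partner", "vc"]):
--             reasons.append("Job title indicates investment role")
--         if any(kw in company for kw in ["capital", "ventures", "fund"]):
--             reasons.append("Company appears to be an investment firm")
--
--     elif classification == "enabler":
--         if any(kw in job_title for kw in ["advisor", "mentor", "consultant"]):
--             reasons.append("Job title indicates advisory role")
--         if any(kw in company for kw in ["accelerator", "incubator"]):
--             reasons.append("Associated with startup ecosystem support")
--
--     else:  # professional
--         reasons.append("General professional profile")
--
--     if not reasons:
--         reasons.append("Classification based on overall profile analysis")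
--
--     return "; ".join(reasons)
-- ===== SOURCE B (Python) =====
-- _RULES = [
--     ("founder", 0, ("founder", "ceo", "chief executive"), "Job title indicates a founding role"),
--     ("founder", 0, ("entrepreneur", "started"), "Background suggests entrepreneurship"),
--     ("investor", 0, ("investor", "partner", "vc"), "Job title indicates investment role"),
--     ("investor", 1, ("capital", "ventures", "fund"), "Company appears to be an investment firm"),
--     ("enabler", 0, ("advisor", "mentor", "consultant"), "Job title indicates advisory role"),
--     ("enabler", 1, ("accelerator", "incubator"), "Associated with startup ecosystem support"),
-- ]
--
--
-- def _emit(rules, classification, fields):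
--     """Recursively build the '; '-joined reason string for the matching rules."""
--     if not rules:
--         return ""
--     (cls, idx, kws, msg), rest = rules[0], rules[1:]
--     tail = _emit(rest, classification, fields)
--     if cls == classification and any(kw in fields[idx] for kw in kws):
--         return msg + ("; " + tail) if tail else msg
--     return tail
--
--
-- def get_classification_reasoning(contact_data, classification):
--     if all(cls != classification for cls, _, _, _ in _RULES):
--         return "General professional profile"
--     fields = (contact_data.get("job_title", "").lower(),
--               contact_data.get("company", "").lower())
--     return _emit(_RULES, classification, fields) or "Classification based on overall profile analysis"
-- ===== Notes on version B (the rewrite author's own statement) =====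
-- stated objective: alternative
-- what changed: Replaced A's if/elif per-classification dispatch that appends to a reasons list and joins it by a single recursion over one flat tagged (classification, field, keywords, message) rule list that builds the '; '-joined string directly back-to-front, with the unknown-classification default decided up front by an absence check on the rule tags.
import Mathlib
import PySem

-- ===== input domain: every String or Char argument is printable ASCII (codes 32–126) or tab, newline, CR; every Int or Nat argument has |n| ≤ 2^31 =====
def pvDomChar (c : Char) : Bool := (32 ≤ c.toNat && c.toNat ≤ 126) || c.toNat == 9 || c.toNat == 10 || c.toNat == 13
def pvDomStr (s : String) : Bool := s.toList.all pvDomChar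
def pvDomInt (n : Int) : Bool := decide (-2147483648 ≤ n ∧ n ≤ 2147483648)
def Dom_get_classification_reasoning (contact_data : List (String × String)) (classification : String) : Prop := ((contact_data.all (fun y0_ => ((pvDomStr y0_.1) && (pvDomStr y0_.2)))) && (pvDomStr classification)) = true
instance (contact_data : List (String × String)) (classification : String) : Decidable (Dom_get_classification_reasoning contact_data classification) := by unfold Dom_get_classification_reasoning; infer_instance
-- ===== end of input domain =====

-- B replaces A's per-classification if/elif dispatch and reasons-list + join by a single
-- recursion over one flat tagged rule list that builds the '; '-joined string directly
-- back-to-front (idiomatic/alternative decomposition; same cost, same return value).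

-- ===== PORT A =====
def get_classification_reasoning (contact_data : List (String × String)) (classification : String) : String :=
  let job_title := PySem.Str.lower ((PySem.Dict.ofList contact_data).getD "job_title" "")
  let company := PySem.Str.lower ((PySem.Dict.ofList contact_data).getD "company" "")
  let reasons : List String := []
  let reasons :=
    if classification == "founder" then
      let reasons := if ["founder", "ceo", "chief executive"].any (fun kw => PySem.Str.isIn kw job_title) then reasons ++ ["Job title indicates a founding role"] else reasons
      let reasons := if ["entrepreneur", "started"].any (fun kw => PySem.Str.isIn kw job_title) then reasons ++ ["Background suggests entrepreneurship"] else reasons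
      reasons
    else if classification == "investor" then
      let reasons := if ["investor", "partner", "vc"].any (fun kw => PySem.Str.isIn kw job_title) then reasons ++ ["Job title indicates investment role"] else reasons
      let reasons := if ["capital", "ventures", "fund"].any (fun kw => PySem.Str.isIn kw company) then reasons ++ ["Company appears to be an investment firm"] else reasons
      reasons
    else if classification == "enabler" then
      let reasons := if ["advisor", "mentor", "consultant"].any (fun kw => PySem.Str.isIn kw job_title) then reasons ++ ["Job title indicates advisory role"] else reasons
      let reasons := if ["accelerator", "incubator"].any (fun kw => PySem.Str.isIn kw company) then reasons ++ ["Associated with startup ecosystem support"] else reasons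
      reasons
    else
      reasons ++ ["General professional profile"]
  let reasons := if reasons.isEmpty then reasons ++ ["Classification based on overall profile analysis"] else reasons
  PySem.Str.join "; " reasons

-- ===== PORT B =====
-- the flat _RULES list of Source B: (classification tag, field index, keywords, message)
def pvRulesB : List (String × Nat × List String × String) :=
  [("founder", 0, ["founder", "ceo", "chief executive"], "Job title indicates a founding role"),
   ("founder", 0, ["entrepreneur", "started"], "Background suggests entrepreneurship"),
   ("investor", 0, ["investor", "partner", "vc"], "Job title indicates investment role"),
   ("investor", 1, ["capital", "ventures", "fund"], "Company appears to be an investment firm"),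
   ("enabler", 0, ["advisor", "mentor", "consultant"], "Job title indicates advisory role"),
   ("enabler", 1, ["accelerator", "incubator"], "Associated with startup ecosystem support")]

-- _emit of Source B: recursive back-to-front construction of the '; '-joined string
def pvEmit (rules : List (String × Nat × List String × String)) (classification : String) (fields : String × String) : String :=
  match rules with
  | [] => ""
  | r :: rest =>
    let tail := pvEmit rest classification fields
    if r.1 == classification && r.2.2.1.any (fun kw => PySem.Str.isIn kw (if r.2.1 == 0 then fields.1 else fields.2)) then
      if tail == "" then r.2.2.2 else r.2.2.2 ++ ("; " ++ tail)
    else tail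

def get_classification_reasoning_alt (contact_data : List (String × String)) (classification : String) : String :=
  if pvRulesB.all (fun r => r.1 != classification) then "General professional profile"
  else
    let fields := (PySem.Str.lower ((PySem.Dict.ofList contact_data).getD "job_title" ""),
                   PySem.Str.lower ((PySem.Dict.ofList contact_data).getD "company" ""))
    let s := pvEmit pvRulesB classification fields
    if s == "" then "Classification based on overall profile analysis" else s

-- ===== PRECONDITION & SPEC =====
def Spec_get_classification_reasoning (contact_data : List (String × String)) (classification : String) (out : String) : Prop := out = get_classification_reasoning_alt contact_data classification
instance (contact_data : List (String × String)) (classification : String) (out : String) : Decidable (Spec_get_classification_reasoning contact_data classification out) := by unfold Spec_get_classification_reasoning; infer_instance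

-- ===== CLAIM =====
def Claim_equal_get_classification_reasoning : Prop := ∀ (contact_data : List (String × String)) (classification : String), Dom_get_classification_reasoning contact_data classification → Spec_get_classification_reasoning contact_data classification (get_classification_reasoning contact_data classification)

-- ===== LEMMAS AND PROOFS =====

-- ===== VERDICT =====
set_option maxRecDepth 8192 in
theorem get_classification_reasoning_spec : Claim_equal_get_classification_reasoning := by
  intro cd cls _
  unfold Spec_get_classification_reasoning get_classification_reasoning get_classification_reasoning_alt
  by_cases h1 : cls = "founder"
  · subst h1
    simp only [pvRulesB, pvEmit, List.all, List.any, bne_self_eq_false, Bool.false_and,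
      beq_self_eq_true, Bool.true_and, String.reduceBEq,
      Bool.false_eq_true, if_false, reduceIte, Nat.reduceBEq]
    split_ifs
    all_goals try decide
    all_goals (exfalso; simp_all)
  by_cases h2 : cls = "investor"
  · subst h2
    simp only [pvRulesB, pvEmit, List.all, List.any, bne_self_eq_false, Bool.false_and,
      beq_self_eq_true, Bool.true_and, String.reduceBEq,
      Bool.false_eq_true, if_false, reduceIte, Nat.reduceBEq]
    split_ifs
    all_goals try decide
    all_goals (exfalso; simp_all)
  by_cases h3 : cls = "enabler"
  · subst h3
    simp only [pvRulesB, pvEmit, List.all, List.any, bne_self_eq_false, Bool.false_and,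
      beq_self_eq_true, Bool.true_and, String.reduceBEq,
      Bool.false_eq_true, if_false, reduceIte, Nat.reduceBEq]
    split_ifs
    all_goals try decide
    all_goals (exfalso; simp_all)
  · have hf : (cls == "founder") = false := by simp [h1]
    have hi : (cls == "investor") = false := by simp [h2]
    have he : (cls == "enabler") = false := by simp [h3]
    have hf' : ("founder" != cls) = true := by simp [bne]; exact fun h => h1 h.symm
    have hi' : ("investor" != cls) = true := by simp [bne]; exact fun h => h2 h.symm
    have he' : ("enabler" != cls) = true := by simp [bne]; exact fun h => h3 h.symm
    simp only [pvRulesB, List.all, hf, hi, he, hf', hi', he', Bool.and_self,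
      if_false, if_true, Bool.false_eq_true]
    decide
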